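-- pv_equiv track=rewrite | github.com/moppius/advent-of-code | 2020/day_06/day_06.py | _sum_group
-- ===== SOURCE A (Python) =====
-- def _sum_group(response):
--     result = ""
--     lines = response.split('\n')
--     for line in lines:
--         for char in line:
--             if char not in result:
--                 result += char
--     return len(result)
-- ===== SOURCE B (Python) =====
-- def _sum_group(response):
--     chars = sorted(c for c in response if c != '\n')
--     count = 0
--     prev = None
--     for c in chars:
--         if c != prev:
--             count += 1
--             prev = c
--     return count
-- ===== Notes on version B (the rewrite author's own statement) =====
-- stated objective: alternative
-- what changed: Replaced A's incremental dedup (nested loops over split lines with a membership scan before each append) by sort-then-scan: sort the non-newline characters and count positions where the character differs from its predecessor.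
import Mathlib
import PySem

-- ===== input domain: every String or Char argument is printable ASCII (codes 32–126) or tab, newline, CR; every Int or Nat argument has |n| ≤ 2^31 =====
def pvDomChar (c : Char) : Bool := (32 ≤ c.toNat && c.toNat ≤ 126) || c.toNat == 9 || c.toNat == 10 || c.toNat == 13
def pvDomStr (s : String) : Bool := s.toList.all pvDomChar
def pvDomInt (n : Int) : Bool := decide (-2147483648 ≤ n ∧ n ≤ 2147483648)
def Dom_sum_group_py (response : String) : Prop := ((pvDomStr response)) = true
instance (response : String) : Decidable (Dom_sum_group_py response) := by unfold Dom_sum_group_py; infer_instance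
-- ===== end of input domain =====

-- B sorts the non-newline characters and counts positions where the character differs from
-- its predecessor (sort-based dedup), instead of A's incremental membership-scan dedup; objective: alternative.

-- ===== PORT A =====
-- A: result = ""; for line in response.split('\n'): for char in line: if char not in result: result += char; return len(result)
-- ported on List Char; split('\n') is PySem.Chars.splitOn (exact; sep nonempty so Python never raises)
def sum_group_py (response : String) : Int :=
  let lines := PySem.Chars.splitOn response.toList ['\n']
  let result := lines.foldl (fun result line =>
    line.foldl (fun result char =>
      if result.contains char then result else result ++ [char]) result) ([] : List Char)
  (result.length : Int)

-- ===== PORT B =====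
-- B: chars = sorted(c for c in response if c != '\n'); count = 0; prev = None;
--    for c in chars: if c != prev: count += 1; prev = c
--    return count
def sum_group_py_alt (response : String) : Int :=
  let chars := PySem.List.sorted (response.toList.filter (fun c => !(c == '\n'))) (fun x => x) false
  let st := chars.foldl (fun (st : Int × Option Char) c =>
    if some c ≠ st.2 then (st.1 + 1, some c) else st) ((0 : Int), (none : Option Char))
  st.1

-- ===== PRECONDITION & SPEC =====
def Spec_sum_group_py (response : String) (out : Int) : Prop := out = sum_group_py_alt response
instance (response : String) (out : Int) : Decidable (Spec_sum_group_py response out) := by unfold Spec_sum_group_py; infer_instance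

-- ===== CLAIM (what is proved, stated in full; the proofs are below) =====
def Claim_equal_sum_group_py : Prop := ∀ (response : String), Dom_sum_group_py response → Spec_sum_group_py response (sum_group_py response)

-- ===== LEMMAS AND PROOFS =====

-- flattening the pieces of splitOn by ['\n'] gives the string with its newlines removed
theorem pv_flatten_go (fuel : Nat) : ∀ (l cur : List Char) (acc : List (List Char)),
    l.length ≤ fuel →
    (PySem.Chars.splitOn.go ['\n'] fuel l cur acc).flatten =
      acc.reverse.flatten ++ cur.reverse ++ l.filter (fun c => !(c == '\n')) := by
  induction fuel with
  | zero =>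
    intro l cur acc h
    have hl : l = [] := List.length_eq_zero_iff.mp (Nat.le_zero.mp h)
    subst hl
    simp [PySem.Chars.splitOn.go]
  | succ n ih =>
    intro l cur acc h
    cases l with
    | nil => simp [PySem.Chars.splitOn.go]
    | cons c rest =>
      by_cases hc : c = '\n'
      · subst hc
        have heq : PySem.Chars.splitOn.go ['\n'] (n+1) ('\n' :: rest) cur acc
            = PySem.Chars.splitOn.go ['\n'] n (List.drop 1 ('\n' :: rest)) [] (cur.reverse :: acc) := by
          simp [PySem.Chars.splitOn.go, List.isPrefixOf]
        rw [heq]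
        simp only [List.drop_succ_cons, List.drop_zero]
        rw [ih rest [] (cur.reverse :: acc) (by simpa using Nat.le_of_succ_le_succ h)]
        simp
      · have hc' : ¬ ('\n' = c) := fun h => hc h.symm
        have heq : PySem.Chars.splitOn.go ['\n'] (n+1) (c :: rest) cur acc
            = PySem.Chars.splitOn.go ['\n'] n rest (c :: cur) acc := by
          simp [PySem.Chars.splitOn.go, List.isPrefixOf, hc']
        rw [heq]
        rw [ih rest (c :: cur) acc (by simpa using Nat.le_of_succ_le_succ h)]
        simp [hc]

theorem pv_flatten_splitOn (cs : List Char) :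
    (PySem.Chars.splitOn cs ['\n']).flatten = cs.filter (fun c => !(c == '\n')) := by
  have := pv_flatten_go (cs.length + 1) cs [] [] (Nat.le_succ _)
  simpa [PySem.Chars.splitOn] using this

-- A's dedup value: its length is the number of distinct characters, as a Finset card
theorem pv_ofList_length_eq_card (m : List Char) :
    (PySem.Set.ofList m).length = m.toFinset.card := by
  have hnd : (PySem.Set.ofList m).Nodup := PySem.Set.nodup_ofList m
  have hfs : (PySem.Set.ofList m).toFinset = m.toFinset := by
    ext x
    simp [List.mem_toFinset, PySem.Set.mem_ofList]
  rw [← hfs, List.toFinset_card_of_nodup hnd]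

-- B's scan over a sorted tail: with prev = some p, p ≤ every element, the count rises by
-- the number of distinct elements other than p
theorem pv_scan_inv : ∀ (l : List Char), l.Pairwise (· ≤ ·) →
    ∀ (k : Int) (p : Char), (∀ x ∈ l, p ≤ x) →
    (l.foldl (fun (st : Int × Option Char) c =>
        if some c ≠ st.2 then (st.1 + 1, some c) else st) (k, some p)).1
      = k + ((l.toFinset.erase p).card : Int) := by
  intro l
  induction l with
  | nil => intro _ k p _; simp
  | cons c rest ih =>
    intro hpw k p hle
    have hrest : rest.Pairwise (· ≤ ·) := (List.pairwise_cons.mp hpw).2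
    have hc : ∀ x ∈ rest, c ≤ x := (List.pairwise_cons.mp hpw).1
    by_cases hcp : c = p
    · subst hcp
      have : (List.foldl (fun (st : Int × Option Char) c =>
          if some c ≠ st.2 then (st.1 + 1, some c) else st) (k, some c) (c :: rest))
          = List.foldl (fun (st : Int × Option Char) c =>
          if some c ≠ st.2 then (st.1 + 1, some c) else st) (k, some c) rest := by simp
      rw [this, ih hrest k c hc]
      have hfs : (c :: rest).toFinset.erase c = rest.toFinset.erase c := by
        ext x; by_cases hx : x = c <;> simp [Finset.mem_erase, hx]
      rw [hfs]
    · have hstep : (List.foldl (fun (st : Int × Option Char) c =>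
          if some c ≠ st.2 then (st.1 + 1, some c) else st) (k, some p) (c :: rest))
          = List.foldl (fun (st : Int × Option Char) c =>
          if some c ≠ st.2 then (st.1 + 1, some c) else st) (k + 1, some c) rest := by
        simp [hcp]
      rw [hstep, ih hrest (k + 1) c hc]
      have hplt : p < c := lt_of_le_of_ne (hle c (List.mem_cons_self)) (fun h => hcp h.symm)
      have hpnot : p ∉ (c :: rest).toFinset := by
        simp only [List.mem_toFinset, List.mem_cons]
        rintro (h | h)
        · exact (ne_of_lt hplt) h
        · exact absurd rfl (ne_of_lt (lt_of_lt_of_le hplt (hc p h)))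
      rw [Finset.erase_eq_of_notMem hpnot]
      have hins : (c :: rest).toFinset = insert c (rest.toFinset.erase c) := by
        ext x; simp [Finset.mem_erase]; tauto
      rw [hins, Finset.card_insert_of_notMem (Finset.notMem_erase c _)]
      push_cast
      ring

-- ===== VERDICT (by name: the statement is the Claim_ definition above) =====
theorem sum_group_py_spec : Claim_equal_sum_group_py := by
  intro response _
  show (((PySem.Chars.splitOn response.toList ['\n']).foldl (fun result line =>
      line.foldl (fun result char =>
        if result.contains char then result else result ++ [char]) result) ([] : List Char)).length : Int)
    = sum_group_py_alt response
  have hstep : (fun (result : List Char) (char : Char) =>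
      if result.contains char then result else result ++ [char]) = PySem.Set.add := by
    funext s c; simp [PySem.Set.add]
  rw [hstep, ← List.foldl_flatten, pv_flatten_splitOn, ← PySem.Set.ofList_eq_foldl,
    pv_ofList_length_eq_card]
  -- the B side
  unfold sum_group_py_alt
  set f := response.toList.filter (fun c => !(c == '\n')) with hf
  have hperm : (PySem.List.sorted f (fun x => x) false).Perm f := PySem.List.sorted_perm f _ _
  have hpw : (PySem.List.sorted f (fun x => x) false).Pairwise (· ≤ ·) := by
    have := PySem.List.sorted_pairwise f (fun x => x)
    simpa using this
  have hfs : (PySem.List.sorted f (fun x => x) false).toFinset = f.toFinset := by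
    ext x; simp [List.mem_toFinset, hperm.mem_iff]
  rcases hs : PySem.List.sorted f (fun x => x) false with _ | ⟨c, rest⟩
  · rw [hs] at hfs
    simp [← hfs]
  · rw [hs] at hfs hpw
    have hc : ∀ x ∈ rest, c ≤ x := (List.pairwise_cons.mp hpw).1
    have hrest : rest.Pairwise (· ≤ ·) := (List.pairwise_cons.mp hpw).2
    simp only [List.foldl_cons]
    have h1 : ((if some c ≠ (none : Option Char) then ((0 : Int) + 1, some c) else (0, none)))
        = ((1 : Int), some c) := by simp
    rw [h1, pv_scan_inv rest hrest 1 c hc]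
    have hins : (c :: rest).toFinset = insert c (rest.toFinset.erase c) := by
      ext x; simp [Finset.mem_erase]; tauto
    rw [← hfs, hins, Finset.card_insert_of_notMem (Finset.notMem_erase c _)]
    push_cast
    ring
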